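-- pv_equiv track=rewrite | github.com/SylvainDe/aoc2021 | day22.py | range_split
-- ===== SOURCE A (Python) =====
-- def range_check(interval):
--     begin, end = interval
--     assert begin <= end
--
-- def range_contains(interval, value):
--     range_check(interval)
--     begin, end = interval
--     return begin <= value <= end
--
-- def range_split(interval1, interval2):
--     range_check(interval1)
--     range_check(interval2)
--     beg1, end1 = interval1
--     beg2, end2 = interval2
--     # This should be easy, there are only 3 cases:
--     # Case 1:
--     #      +------+
--     #               +------+
--     #     gives:
--     #      +------+
--     #               +------+
--     # Case 2:
--     #      +------+
--     #          +------+
--     #     gives: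
--     #      +--++--+
--     #          +--++--+
--     # Case 3:
--     #      +-------------+
--     #          +------+
--     #     gives:
--     #      +--++------++-+
--     #          +------+
--     # But for the edge cases make things slightly trickier:
--     #      +------+
--     #             +------+
--     #     gives:
--     #      +-----+x
--     #             x+-----+
--     # Or
--     #      +--------------+
--     #             +
--     #     gives:
--     #      +-----+x+------+
--     #             x
--     ret1, ret2 = [], []
--     midpoints = set()
--     for p in [beg1, beg2, end1, end2]:
--         for p2 in [p - 1, p, p + 1]:
--             midpoints.add(p2)
--     prevIn1, prevIn2 = False, False
--     beg, end = None, None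
--     for p in sorted(midpoints):
--         in1, in2 = (range_contains(interval1, p), range_contains(interval2, p))
--         if beg is None:
--             beg, end = p, p
--         elif (prevIn1, prevIn2) == (in1, in2):
--             end = p
--         else:
--             if prevIn1:
--                 ret1.append((beg, end))
--             if prevIn2:
--                 ret2.append((beg, end))
--             beg, end = p, p
--         prevIn1, prevIn2 = in1, in2
--     if prevIn1:
--         ret1.append((beg, end))
--     if prevIn2:
--         ret2.append((beg, end))
--     return ret1, ret2
-- ===== SOURCE B (Python) =====
-- def range_check(interval):
--     begin, end = interval
--     assert begin <= end
--
-- def range_split(interval1, interval2):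
--     range_check(interval1)
--     range_check(interval2)
--     beg1, end1 = interval1
--     beg2, end2 = interval2
--     lo, hi = max(beg1, beg2), min(end1, end2)
--     if lo > hi:  # no overlap
--         return [(beg1, end1)], [(beg2, end2)]
--     ret1 = [(b, e) for (b, e) in [(beg1, lo - 1), (lo, hi), (hi + 1, end1)] if b <= e]
--     ret2 = [(b, e) for (b, e) in [(beg2, lo - 1), (lo, hi), (hi + 1, end2)] if b <= e]
--     return ret1, ret2
-- ===== Notes on version B (the rewrite author's own statement) =====
-- stated objective: simpler
-- what changed: Replaces A's build-a-set-of-12-midpoints, sort, and sweep-with-run-detection loop by direct interval arithmetic: lo = max(beg1,beg2), hi = min(end1,end2), and each result list is the nonempty pieces among [(beg, lo-1), (lo, hi), (hi+1, end)].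
import Mathlib
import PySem

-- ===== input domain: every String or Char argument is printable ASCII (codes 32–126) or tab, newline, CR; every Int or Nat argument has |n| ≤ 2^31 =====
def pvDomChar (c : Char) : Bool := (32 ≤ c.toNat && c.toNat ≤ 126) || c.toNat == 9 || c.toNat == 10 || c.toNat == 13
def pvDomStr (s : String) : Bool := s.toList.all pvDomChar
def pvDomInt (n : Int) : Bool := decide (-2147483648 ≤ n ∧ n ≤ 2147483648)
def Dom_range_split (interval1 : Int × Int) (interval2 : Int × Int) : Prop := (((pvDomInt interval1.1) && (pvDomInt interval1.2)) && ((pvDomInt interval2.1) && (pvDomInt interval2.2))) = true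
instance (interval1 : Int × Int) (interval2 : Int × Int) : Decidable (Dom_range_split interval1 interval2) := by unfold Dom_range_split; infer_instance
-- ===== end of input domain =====

-- B replaces A's sorted-midpoint sweep by direct interval arithmetic on max/min of the endpoints (simpler).

-- ===== PORT A =====
-- range_check's `assert begin <= end` raises AssertionError when it fails; those inputs are excluded by Pre_range_split.
def range_contains (interval : Int × Int) (value : Int) : Bool :=
  decide (interval.1 ≤ value) && decide (value ≤ interval.2)

-- loop body of A's sweep; state = (ret1, ret2, prevIn1, prevIn2, (beg, end) or none).
-- Python keeps `beg` and `end` as two variables always assigned together ('beg, end = p, p'); they are one Option pair here.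
def rsStep (interval1 interval2 : Int × Int)
    (st : List (Int × Int) × List (Int × Int) × Bool × Bool × Option (Int × Int)) (p : Int) :
    List (Int × Int) × List (Int × Int) × Bool × Bool × Option (Int × Int) :=
  let in1 := range_contains interval1 p
  let in2 := range_contains interval2 p
  match st with
  | (ret1, ret2, _, _, none) => (ret1, ret2, in1, in2, some (p, p))
  | (ret1, ret2, prevIn1, prevIn2, some (b, e)) =>
    if (prevIn1, prevIn2) = (in1, in2) then (ret1, ret2, in1, in2, some (b, p))
    else ((if prevIn1 then ret1 ++ [(b, e)] else ret1),
          (if prevIn2 then ret2 ++ [(b, e)] else ret2), in1, in2, some (p, p))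

-- the trailing 'if prevIn1: ret1.append((beg, end))' / 'if prevIn2: …' after the loop
def rsFinish (st : List (Int × Int) × List (Int × Int) × Bool × Bool × Option (Int × Int)) :
    (List (Int × Int)) × (List (Int × Int)) :=
  match st with
  | (ret1, ret2, prevIn1, prevIn2, some (b, e)) =>
      ((if prevIn1 then ret1 ++ [(b, e)] else ret1), (if prevIn2 then ret2 ++ [(b, e)] else ret2))
  | (ret1, ret2, _, _, none) => (ret1, ret2)

def range_split (interval1 : Int × Int) (interval2 : Int × Int) : (List (Int × Int)) × (List (Int × Int)) :=
  let beg1 := interval1.1; let end1 := interval1.2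
  let beg2 := interval2.1; let end2 := interval2.2
  let midpoints : PySem.Set Int :=
    [beg1, beg2, end1, end2].foldl
      (fun m p => [p - 1, p, p + 1].foldl (fun m p2 => PySem.Set.add m p2) m) PySem.Set.empty
  rsFinish ((PySem.List.sorted midpoints (fun x => x) false).foldl (rsStep interval1 interval2)
    ([], [], false, false, none))

-- ===== PORT B =====
def range_split_alt (interval1 : Int × Int) (interval2 : Int × Int) : (List (Int × Int)) × (List (Int × Int)) :=
  let beg1 := interval1.1; let end1 := interval1.2
  let beg2 := interval2.1; let end2 := interval2.2
  let lo := max beg1 beg2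
  let hi := min end1 end2
  if lo > hi then ([(beg1, end1)], [(beg2, end2)])
  else
    (([(beg1, lo - 1), (lo, hi), (hi + 1, end1)]).filter (fun p => decide (p.1 ≤ p.2)),
     ([(beg2, lo - 1), (lo, hi), (hi + 1, end2)]).filter (fun p => decide (p.1 ≤ p.2)))

-- ===== PRECONDITION & SPEC =====
-- A (and B) assert begin <= end for both intervals; Pre_ excludes exactly the AssertionError inputs.
def Pre_range_split (interval1 : Int × Int) (interval2 : Int × Int) : Prop :=
  interval1.1 ≤ interval1.2 ∧ interval2.1 ≤ interval2.2
instance (interval1 : Int × Int) (interval2 : Int × Int) : Decidable (Pre_range_split interval1 interval2) := by unfold Pre_range_split; infer_instance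
def pvWitness_range_split : (Int × Int) × (Int × Int) := ((0, 3), (2, 5))

def Spec_range_split (interval1 : Int × Int) (interval2 : Int × Int) (out : (List (Int × Int)) × (List (Int × Int))) : Prop := out = range_split_alt interval1 interval2
instance (interval1 : Int × Int) (interval2 : Int × Int) (out : (List (Int × Int)) × (List (Int × Int))) : Decidable (Spec_range_split interval1 interval2 out) := by unfold Spec_range_split; infer_instance

-- ===== CLAIM (what is proved, stated in full; the proofs are below) =====
def Claim_equal_range_split : Prop := ∀ (interval1 : Int × Int) (interval2 : Int × Int), Dom_range_split interval1 interval2 → Pre_range_split interval1 interval2 → Spec_range_split interval1 interval2 (range_split interval1 interval2)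


-- ===== LEMMAS AND PROOFS =====

-- the (in1, in2) signature of a point
def sig (i1 i2 : Int × Int) (x : Int) : Bool × Bool := (range_contains i1 x, range_contains i2 x)

-- a description of one maximal constant-signature segment of the midpoint sweep
structure Seg where
  b : Int
  e : Int
  s : Bool × Bool
deriving DecidableEq, Repr

-- segments are ordered, nonempty, and adjacent signatures differ
def segsOK : Int → (Bool × Bool) → List Seg → Prop
  | _, _, [] => True
  | pe, ps, g :: rest => pe < g.b ∧ g.b ≤ g.e ∧ ps ≠ g.s ∧ segsOK g.e g.s rest

def outs1 (segs : List Seg) : List (Int × Int) :=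
  segs.filterMap (fun g => if g.s.1 then some (g.b, g.e) else none)
def outs2 (segs : List Seg) : List (Int × Int) :=
  segs.filterMap (fun g => if g.s.2 then some (g.b, g.e) else none)

lemma segsOK_lt : ∀ (segs : List Seg) (pe : Int) (ps : Bool × Bool), segsOK pe ps segs →
    ∀ h ∈ segs, pe < h.b ∧ h.b ≤ h.e := by
  intro segs
  induction segs with
  | nil => simp
  | cons g rest ih =>
    intro pe ps hok h hm
    obtain ⟨h1, h2, _, h4⟩ := hok
    rcases List.mem_cons.mp hm with rfl | hm
    · exact ⟨h1, h2⟩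
    · have := ih g.e g.s h4 h hm
      exact ⟨by omega, this.2⟩

lemma fold_segs (i1 i2 : Int × Int) :
    ∀ (L : List Int) (g : Seg) (segs : List Seg) (r1 r2 : List (Int × Int)) (b e : Int),
    (∀ x, g.b ≤ x → x ≤ g.e → sig i1 i2 x = g.s) →
    (∀ h ∈ segs, ∀ x, h.b ≤ x → x ≤ h.e → sig i1 i2 x = h.s) →
    (e :: L).Pairwise (· < ·) →
    g.b ≤ e → e ≤ g.e →
    (g.e ∈ L ∨ g.e = e) →
    (∀ x ∈ L, (g.b ≤ x ∧ x ≤ g.e) ∨ ∃ h ∈ segs, h.b ≤ x ∧ x ≤ h.e) →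
    (∀ h ∈ segs, h.b ∈ L ∧ h.e ∈ L) →
    segsOK g.e g.s segs →
    rsFinish (L.foldl (rsStep i1 i2) (r1, r2, g.s.1, g.s.2, some (b, e)))
      = (r1 ++ outs1 ({ b := b, e := g.e, s := g.s } :: segs),
         r2 ++ outs2 ({ b := b, e := g.e, s := g.s } :: segs)) := by
  intro L
  induction L with
  | nil =>
    intro g segs r1 r2 b e hsig hss hpw hbe1 hbe2 hge hcov hends hok
    cases segs with
    | cons h rest => exact absurd (hends h (by simp)).1 (by simp)
    | nil =>
      have hge' : g.e = e := by rcases hge with h | h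
                                · simp at h
                                · exact h
      cases hs1 : g.s.1 <;> cases hs2 : g.s.2 <;>
        simp [rsFinish, outs1, outs2, hs1, hs2, hge']
  | cons x xs ih =>
    intro g segs r1 r2 b e hsig hss hpw hbe1 hbe2 hge hcov hends hok
    have hex : e < x := (List.pairwise_cons.mp hpw).1 x (by simp)
    have hpw' : (x :: xs).Pairwise (· < ·) := (List.pairwise_cons.mp hpw).2
    have hxall : ∀ y ∈ xs, x < y := (List.pairwise_cons.mp hpw').1
    by_cases hx : x ≤ g.e
    · -- x continues the current run
      have hsx : sig i1 i2 x = g.s := hsig x (by omega) hx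
      have hc1 : range_contains i1 x = g.s.1 := by rw [← hsx]; rfl
      have hc2 : range_contains i2 x = g.s.2 := by rw [← hsx]; rfl
      have hstep : rsStep i1 i2 (r1, r2, g.s.1, g.s.2, some (b, e)) x
          = (r1, r2, g.s.1, g.s.2, some (b, x)) := by
        simp [rsStep, hc1, hc2]
      rw [List.foldl_cons, hstep]
      refine ih g segs r1 r2 b x hsig hss hpw' (by omega) hx ?_ ?_ ?_ hok
      · rcases hge with h | h
        · rcases List.mem_cons.mp h with h' | h'
          · exact Or.inr h'
          · exact Or.inl h'
        · omega
      · exact fun y hy => hcov y (List.mem_cons_of_mem _ hy)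
      · intro h hm
        have hlt := segsOK_lt segs g.e g.s hok h hm
        have h1 := (hends h hm).1
        have h2 := (hends h hm).2
        constructor
        · rcases List.mem_cons.mp h1 with h' | h'
          · omega
          · exact h'
        · rcases List.mem_cons.mp h2 with h' | h'
          · -- h.e = x, but h.e ≥ h.b > g.e ≥ x
            have := segsOK_lt segs g.e g.s hok h hm
            omega
          · exact h'
    · -- x starts the next segment: flush
      have hgee : g.e = e := by
        rcases hge with h | h
        · rcases List.mem_cons.mp h with h' | h'
          · omega
          · have := hxall _ h'; omega
        · exact h
      cases segs with
      | nil =>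
        exfalso
        rcases hcov x (by simp) with h | h
        · omega
        · simp at h
      | cons g1 rest =>
        obtain ⟨hlt1, hbe1', hne1, hok'⟩ := hok
        have hg1b : g1.b = x := by
          have hmemb : g1.b ∈ x :: xs := (hends g1 (by simp)).1
          have hge1 : x ≤ g1.b := by
            rcases List.mem_cons.mp hmemb with h' | h'
            · omega
            · have := hxall _ h'; omega
          rcases hcov x (by simp) with h | h
          · omega
          · obtain ⟨h2, hh2, hb2, he2⟩ := h
            rcases List.mem_cons.mp hh2 with rfl | hmem2
            · omega
            · have := segsOK_lt rest g1.e g1.s hok' h2 hmem2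
              omega
        have hsx : sig i1 i2 x = g1.s := hss g1 (by simp) x (by omega) (by omega)
        have hc1 : range_contains i1 x = g1.s.1 := by rw [← hsx]; rfl
        have hc2 : range_contains i2 x = g1.s.2 := by rw [← hsx]; rfl
        have hcond : ¬ ((g.s.1, g.s.2) = (range_contains i1 x, range_contains i2 x)) := by
          rw [hc1, hc2]
          intro hcon
          apply hne1
          have h1 := congrArg Prod.fst hcon
          have h2 := congrArg Prod.snd hcon
          simp at h1 h2
          cases hgs : g.s; cases hg1s : g1.s
          simp_all
        have hstep : rsStep i1 i2 (r1, r2, g.s.1, g.s.2, some (b, e)) x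
            = ((if g.s.1 then r1 ++ [(b, e)] else r1), (if g.s.2 then r2 ++ [(b, e)] else r2),
               g1.s.1, g1.s.2, some (x, x)) := by
          have hcond' : ¬ ((g.s.1, g.s.2) = (g1.s.1, g1.s.2)) := by
            rw [hc1, hc2] at hcond; exact hcond
          simp only [rsStep, hc1, hc2]
          rw [if_neg hcond']
        rw [List.foldl_cons, hstep]
        have hih := ih g1 rest (if g.s.1 then r1 ++ [(b, e)] else r1)
          (if g.s.2 then r2 ++ [(b, e)] else r2) x x (hss g1 (by simp))
          (fun h hm => hss h (List.mem_cons_of_mem _ hm)) hpw' (by omega) (by omega)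
          ?_ ?_ ?_ hok'
        · rw [hih]
          cases hs1 : g.s.1 <;> cases hs2 : g.s.2 <;>
            simp [outs1, outs2, hs1, hs2, hgee, ← hg1b, List.append_assoc]
        · have h2 := (hends g1 (by simp)).2
          rcases List.mem_cons.mp h2 with h' | h'
          · exact Or.inr h'
          · exact Or.inl h'
        · intro y hy
          rcases hcov y (List.mem_cons_of_mem _ hy) with h | h
          · have := hxall _ hy; omega
          · obtain ⟨h2, hh2, hb2, he2⟩ := h
            rcases List.mem_cons.mp hh2 with rfl | hmem2
            · exact Or.inl ⟨hb2, he2⟩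
            · exact Or.inr ⟨h2, hmem2, hb2, he2⟩
        · intro h hm
          have hlt := segsOK_lt rest g1.e g1.s hok' h hm
          have h1 := (hends h (List.mem_cons_of_mem _ hm)).1
          have h2 := (hends h (List.mem_cons_of_mem _ hm)).2
          constructor
          · rcases List.mem_cons.mp h1 with h' | h'
            · omega
            · exact h'
          · rcases List.mem_cons.mp h2 with h' | h'
            · omega
            · exact h'

-- the twelve generated midpoints, in A's insertion order
def pts (i1 i2 : Int × Int) : List Int :=
  [i1.1 - 1, i1.1, i1.1 + 1, i2.1 - 1, i2.1, i2.1 + 1,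
   i1.2 - 1, i1.2, i1.2 + 1, i2.2 - 1, i2.2, i2.2 + 1]

lemma midpoints_eq (i1 i2 : Int × Int) :
    ([i1.1, i2.1, i1.2, i2.2].foldl
      (fun m p => [p - 1, p, p + 1].foldl (fun m p2 => PySem.Set.add m p2) m)
      (PySem.Set.empty : PySem.Set Int))
    = PySem.Set.ofList (pts i1 i2) := by
  simp only [pts, PySem.Set.ofList_eq_foldl, List.foldl_cons, List.foldl_nil]
  rfl

set_option maxHeartbeats 1000000 in
lemma range_split_eq (i1 i2 : Int × Int) (g : Seg) (segs : List Seg)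
    (hsig : ∀ x, g.b ≤ x → x ≤ g.e → sig i1 i2 x = g.s)
    (hss : ∀ h ∈ segs, ∀ x, h.b ≤ x → x ≤ h.e → sig i1 i2 x = h.s)
    (hok : segsOK g.e g.s segs)
    (hbe : g.b ≤ g.e)
    (hmemb : g.b ∈ pts i1 i2) (hmeme : g.e ∈ pts i1 i2)
    (hmin : ∀ x ∈ pts i1 i2, g.b ≤ x)
    (hcov : ∀ x ∈ pts i1 i2, (g.b ≤ x ∧ x ≤ g.e) ∨ ∃ h ∈ segs, h.b ≤ x ∧ x ≤ h.e)
    (hends : ∀ h ∈ segs, h.b ∈ pts i1 i2 ∧ h.e ∈ pts i1 i2) :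
    range_split i1 i2 = (outs1 (g :: segs), outs2 (g :: segs)) := by
  have hL : ∀ y, y ∈ PySem.List.sorted (PySem.Set.ofList (pts i1 i2)) (fun x => x) false ↔
      y ∈ pts i1 i2 := by
    intro y
    rw [PySem.List.mem_sorted, PySem.Set.mem_ofList]
  have hpw : (PySem.List.sorted (PySem.Set.ofList (pts i1 i2)) (fun x => x) false).Pairwise (· < ·) :=
    PySem.List.sorted_ofList_pairwise_lt (pts i1 i2)
  simp only [range_split]
  rw [midpoints_eq]
  cases hLcase : PySem.List.sorted (PySem.Set.ofList (pts i1 i2)) (fun x => x) false with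
  | nil =>
    exfalso
    have := (hL g.b).mpr hmemb
    rw [hLcase] at this
    simp at this
  | cons x xs =>
    rw [hLcase] at hL hpw
    have hxall : ∀ y ∈ xs, x < y := (List.pairwise_cons.mp hpw).1
    have hxgb : x = g.b := by
      have h1 : g.b ∈ x :: xs := (hL g.b).mpr hmemb
      have h2 : g.b ≤ x := hmin x ((hL x).mp (by simp))
      rcases List.mem_cons.mp h1 with h' | h'
      · omega
      · have := hxall _ h'; omega
    have hsx : sig i1 i2 x = g.s := hsig x (by omega) (by omega)
    have hc1 : range_contains i1 x = g.s.1 := by rw [← hsx]; rfl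
    have hc2 : range_contains i2 x = g.s.2 := by rw [← hsx]; rfl
    have hstep : rsStep i1 i2 ([], [], false, false, none) x
        = ([], [], g.s.1, g.s.2, some (x, x)) := by
      simp [rsStep, hc1, hc2]
    rw [List.foldl_cons, hstep]
    have hgein : g.e ∈ x :: xs := (hL g.e).mpr hmeme
    have hmain := fold_segs i1 i2 xs g segs [] [] x x hsig hss hpw (by omega) (by omega)
      ?_ ?_ ?_ hok
    · rw [hmain, hxgb]
      simp
    · rcases List.mem_cons.mp hgein with h' | h'
      · exact Or.inr h'
      · exact Or.inl h'
    · exact fun y hy => hcov y ((hL y).mp (List.mem_cons_of_mem _ hy))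
    · intro h hm
      have hlt := segsOK_lt segs g.e g.s hok h hm
      have h1 := (hL h.b).mpr (hends h hm).1
      have h2 := (hL h.e).mpr (hends h hm).2
      constructor
      · rcases List.mem_cons.mp h1 with h' | h'
        · omega
        · exact h'
      · rcases List.mem_cons.mp h2 with h' | h'
        · omega
        · exact h'


@[simp] lemma Seg_b (b e : Int) (s : Bool × Bool) : (Seg.mk b e s).b = b := rfl
@[simp] lemma Seg_e (b e : Int) (s : Bool × Bool) : (Seg.mk b e s).e = e := rfl
@[simp] lemma Seg_s (b e : Int) (s : Bool × Bool) : (Seg.mk b e s).s = s := rfl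

lemma sig_mk' {b1 e1 b2 e2 x : Int} {s1 s2 : Bool}
    (h1 : (b1 ≤ x ∧ x ≤ e1) ↔ s1 = true) (h2 : (b2 ≤ x ∧ x ≤ e2) ↔ s2 = true) :
    sig (b1, e1) (b2, e2) x = (s1, s2) := by
  cases s1 <;> cases s2 <;>
    simp_all [sig, range_contains, decide_eq_true_eq, decide_eq_false_iff_not]

lemma sig_TT {b1 e1 b2 e2 x : Int} (h1 : b1 ≤ x ∧ x ≤ e1) (h2 : b2 ≤ x ∧ x ≤ e2) :
    sig (b1, e1) (b2, e2) x = (true, true) := sig_mk' (by simp [h1]) (by simp [h2])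
lemma sig_TF {b1 e1 b2 e2 x : Int} (h1 : b1 ≤ x ∧ x ≤ e1) (h2 : ¬(b2 ≤ x ∧ x ≤ e2)) :
    sig (b1, e1) (b2, e2) x = (true, false) := sig_mk' (by simp [h1]) (by simp [h2])
lemma sig_FT {b1 e1 b2 e2 x : Int} (h1 : ¬(b1 ≤ x ∧ x ≤ e1)) (h2 : b2 ≤ x ∧ x ≤ e2) :
    sig (b1, e1) (b2, e2) x = (false, true) := sig_mk' (by simp [h1]) (by simp [h2])
lemma sig_FF {b1 e1 b2 e2 x : Int} (h1 : ¬(b1 ≤ x ∧ x ≤ e1)) (h2 : ¬(b2 ≤ x ∧ x ≤ e2)) :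
    sig (b1, e1) (b2, e2) x = (false, false) := sig_mk' (by simp [h1]) (by simp [h2])

-- ===== VERDICT (by name: the statement is the Claim_ definition above) =====
set_option maxHeartbeats 1000000 in
theorem range_split_spec : Claim_equal_range_split := by
  intro i1 i2 hdom hpre
  obtain ⟨b1, e1⟩ := i1
  obtain ⟨b2, e2⟩ := i2
  have hp1 : b1 ≤ e1 := hpre.1
  have hp2 : b2 ≤ e2 := hpre.2
  unfold Spec_range_split
  by_cases hov : b2 ≤ e1 ∧ b1 ≤ e2
  case pos =>
    obtain ⟨hov1, hov2⟩ := hov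
    rcases lt_trichotomy b1 b2 with hb | hb | hb <;> rcases lt_trichotomy e1 e2 with he | he | he
    · rw [range_split_eq (b1, e1) (b2, e2) ⟨b1 - 1, b1 - 1, (false, false)⟩
          [⟨b1, b2 - 1, (true, false)⟩, ⟨b2, e1, (true, true)⟩, ⟨e1 + 1, e2, (false, true)⟩, ⟨e2 + 1, e2 + 1, (false, false)⟩]
        (by intro x h1 h2; simp only [Seg_b, Seg_e] at h1 h2
            exact sig_FF (by omega) (by omega))
        (by intro h hm x h1 h2
            simp only [List.mem_cons, List.not_mem_nil, or_false] at hm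
            rcases hm with rfl | rfl | rfl | rfl <;> simp only [Seg_b, Seg_e] at h1 h2
            · exact sig_TF (by omega) (by omega)
            · exact sig_TT (by omega) (by omega)
            · exact sig_FT (by omega) (by omega)
            · exact sig_FF (by omega) (by omega)
            )
        (by simp [segsOK] <;> omega)
        (by simp)
        (by simp [pts])
        (by simp [pts])
        (by intro x hx; simp [pts] at hx; simp; omega)
        (by intro x hx; simp [pts] at hx; simp; omega)
        (by intro h hm
            simp only [List.mem_cons, List.not_mem_nil, or_false] at hm
            rcases hm with rfl | rfl | rfl | rfl <;> exact ⟨by simp [pts], by simp [pts]⟩)]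
      simp only [range_split_alt, List.filter_cons, List.filter_nil, decide_eq_true_eq]
      rw [show max b1 b2 = b2 from max_eq_right (by omega),
    show min e1 e2 = e1 from min_eq_left (by omega),
    if_neg (show ¬ b2 > e1 by omega),
    if_pos (show b1 ≤ b2 - 1 by omega),
    if_pos (show b2 ≤ e1 by omega),
    if_neg (show ¬ (e1 + 1 ≤ e1) by omega),
    if_neg (show ¬ (b2 ≤ b2 - 1) by omega),
    if_pos (show e1 + 1 ≤ e2 by omega)]
      simp [outs1, outs2]
      all_goals omega
    · rw [range_split_eq (b1, e1) (b2, e2) ⟨b1 - 1, b1 - 1, (false, false)⟩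
          [⟨b1, b2 - 1, (true, false)⟩, ⟨b2, e1, (true, true)⟩, ⟨e1 + 1, e1 + 1, (false, false)⟩]
        (by intro x h1 h2; simp only [Seg_b, Seg_e] at h1 h2
            exact sig_FF (by omega) (by omega))
        (by intro h hm x h1 h2
            simp only [List.mem_cons, List.not_mem_nil, or_false] at hm
            rcases hm with rfl | rfl | rfl <;> simp only [Seg_b, Seg_e] at h1 h2
            · exact sig_TF (by omega) (by omega)
            · exact sig_TT (by omega) (by omega)
            · exact sig_FF (by omega) (by omega)
            )
        (by simp [segsOK] <;> omega)
        (by simp)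
        (by simp [pts])
        (by simp [pts])
        (by intro x hx; simp [pts] at hx; simp; omega)
        (by intro x hx; simp [pts] at hx; simp; omega)
        (by intro h hm
            simp only [List.mem_cons, List.not_mem_nil, or_false] at hm
            rcases hm with rfl | rfl | rfl <;> exact ⟨by simp [pts], by simp [pts]⟩)]
      simp only [range_split_alt, List.filter_cons, List.filter_nil, decide_eq_true_eq]
      rw [show max b1 b2 = b2 from max_eq_right (by omega),
    show min e1 e2 = e1 from min_eq_left (by omega),
    if_neg (show ¬ b2 > e1 by omega),
    if_pos (show b1 ≤ b2 - 1 by omega),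
    if_pos (show b2 ≤ e1 by omega),
    if_neg (show ¬ (e1 + 1 ≤ e1) by omega),
    if_neg (show ¬ (b2 ≤ b2 - 1) by omega),
    if_neg (show ¬ (e1 + 1 ≤ e2) by omega)]
      simp [outs1, outs2]
      all_goals omega
    · rw [range_split_eq (b1, e1) (b2, e2) ⟨b1 - 1, b1 - 1, (false, false)⟩
          [⟨b1, b2 - 1, (true, false)⟩, ⟨b2, e2, (true, true)⟩, ⟨e2 + 1, e1, (true, false)⟩, ⟨e1 + 1, e1 + 1, (false, false)⟩]
        (by intro x h1 h2; simp only [Seg_b, Seg_e] at h1 h2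
            exact sig_FF (by omega) (by omega))
        (by intro h hm x h1 h2
            simp only [List.mem_cons, List.not_mem_nil, or_false] at hm
            rcases hm with rfl | rfl | rfl | rfl <;> simp only [Seg_b, Seg_e] at h1 h2
            · exact sig_TF (by omega) (by omega)
            · exact sig_TT (by omega) (by omega)
            · exact sig_TF (by omega) (by omega)
            · exact sig_FF (by omega) (by omega)
            )
        (by simp [segsOK] <;> omega)
        (by simp)
        (by simp [pts])
        (by simp [pts])
        (by intro x hx; simp [pts] at hx; simp; omega)
        (by intro x hx; simp [pts] at hx; simp; omega)
        (by intro h hm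
            simp only [List.mem_cons, List.not_mem_nil, or_false] at hm
            rcases hm with rfl | rfl | rfl | rfl <;> exact ⟨by simp [pts], by simp [pts]⟩)]
      simp only [range_split_alt, List.filter_cons, List.filter_nil, decide_eq_true_eq]
      rw [show max b1 b2 = b2 from max_eq_right (by omega),
    show min e1 e2 = e2 from min_eq_right (by omega),
    if_neg (show ¬ b2 > e2 by omega),
    if_pos (show b1 ≤ b2 - 1 by omega),
    if_pos (show b2 ≤ e2 by omega),
    if_pos (show e2 + 1 ≤ e1 by omega),
    if_neg (show ¬ (b2 ≤ b2 - 1) by omega),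
    if_neg (show ¬ (e2 + 1 ≤ e2) by omega)]
      simp [outs1, outs2]
      all_goals omega
    · rw [range_split_eq (b1, e1) (b2, e2) ⟨b1 - 1, b1 - 1, (false, false)⟩
          [⟨b2, e1, (true, true)⟩, ⟨e1 + 1, e2, (false, true)⟩, ⟨e2 + 1, e2 + 1, (false, false)⟩]
        (by intro x h1 h2; simp only [Seg_b, Seg_e] at h1 h2
            exact sig_FF (by omega) (by omega))
        (by intro h hm x h1 h2
            simp only [List.mem_cons, List.not_mem_nil, or_false] at hm
            rcases hm with rfl | rfl | rfl <;> simp only [Seg_b, Seg_e] at h1 h2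
            · exact sig_TT (by omega) (by omega)
            · exact sig_FT (by omega) (by omega)
            · exact sig_FF (by omega) (by omega)
            )
        (by simp [segsOK] <;> omega)
        (by simp)
        (by simp [pts])
        (by simp [pts])
        (by intro x hx; simp [pts] at hx; simp; omega)
        (by intro x hx; simp [pts] at hx; simp; omega)
        (by intro h hm
            simp only [List.mem_cons, List.not_mem_nil, or_false] at hm
            rcases hm with rfl | rfl | rfl <;> exact ⟨by simp [pts], by simp [pts]⟩)]
      simp only [range_split_alt, List.filter_cons, List.filter_nil, decide_eq_true_eq]
      rw [show max b1 b2 = b2 from max_eq_right (by omega),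
    show min e1 e2 = e1 from min_eq_left (by omega),
    if_neg (show ¬ b2 > e1 by omega),
    if_neg (show ¬ (b1 ≤ b2 - 1) by omega),
    if_pos (show b2 ≤ e1 by omega),
    if_neg (show ¬ (e1 + 1 ≤ e1) by omega),
    if_neg (show ¬ (b2 ≤ b2 - 1) by omega),
    if_pos (show e1 + 1 ≤ e2 by omega)]
      simp [outs1, outs2]
      all_goals omega
    · rw [range_split_eq (b1, e1) (b2, e2) ⟨b1 - 1, b1 - 1, (false, false)⟩
          [⟨b2, e1, (true, true)⟩, ⟨e1 + 1, e1 + 1, (false, false)⟩]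
        (by intro x h1 h2; simp only [Seg_b, Seg_e] at h1 h2
            exact sig_FF (by omega) (by omega))
        (by intro h hm x h1 h2
            simp only [List.mem_cons, List.not_mem_nil, or_false] at hm
            rcases hm with rfl | rfl <;> simp only [Seg_b, Seg_e] at h1 h2
            · exact sig_TT (by omega) (by omega)
            · exact sig_FF (by omega) (by omega)
            )
        (by simp [segsOK] <;> omega)
        (by simp)
        (by simp [pts])
        (by simp [pts])
        (by intro x hx; simp [pts] at hx; simp; omega)
        (by intro x hx; simp [pts] at hx; simp; omega)
        (by intro h hm
            simp only [List.mem_cons, List.not_mem_nil, or_false] at hm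
            rcases hm with rfl | rfl <;> exact ⟨by simp [pts], by simp [pts]⟩)]
      simp only [range_split_alt, List.filter_cons, List.filter_nil, decide_eq_true_eq]
      rw [show max b1 b2 = b2 from max_eq_right (by omega),
    show min e1 e2 = e1 from min_eq_left (by omega),
    if_neg (show ¬ b2 > e1 by omega),
    if_neg (show ¬ (b1 ≤ b2 - 1) by omega),
    if_pos (show b2 ≤ e1 by omega),
    if_neg (show ¬ (e1 + 1 ≤ e1) by omega),
    if_neg (show ¬ (b2 ≤ b2 - 1) by omega),
    if_neg (show ¬ (e1 + 1 ≤ e2) by omega)]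
      simp [outs1, outs2]
      all_goals omega
    · rw [range_split_eq (b1, e1) (b2, e2) ⟨b1 - 1, b1 - 1, (false, false)⟩
          [⟨b2, e2, (true, true)⟩, ⟨e2 + 1, e1, (true, false)⟩, ⟨e1 + 1, e1 + 1, (false, false)⟩]
        (by intro x h1 h2; simp only [Seg_b, Seg_e] at h1 h2
            exact sig_FF (by omega) (by omega))
        (by intro h hm x h1 h2
            simp only [List.mem_cons, List.not_mem_nil, or_false] at hm
            rcases hm with rfl | rfl | rfl <;> simp only [Seg_b, Seg_e] at h1 h2
            · exact sig_TT (by omega) (by omega)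
            · exact sig_TF (by omega) (by omega)
            · exact sig_FF (by omega) (by omega)
            )
        (by simp [segsOK] <;> omega)
        (by simp)
        (by simp [pts])
        (by simp [pts])
        (by intro x hx; simp [pts] at hx; simp; omega)
        (by intro x hx; simp [pts] at hx; simp; omega)
        (by intro h hm
            simp only [List.mem_cons, List.not_mem_nil, or_false] at hm
            rcases hm with rfl | rfl | rfl <;> exact ⟨by simp [pts], by simp [pts]⟩)]
      simp only [range_split_alt, List.filter_cons, List.filter_nil, decide_eq_true_eq]
      rw [show max b1 b2 = b2 from max_eq_right (by omega),
    show min e1 e2 = e2 from min_eq_right (by omega),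
    if_neg (show ¬ b2 > e2 by omega),
    if_neg (show ¬ (b1 ≤ b2 - 1) by omega),
    if_pos (show b2 ≤ e2 by omega),
    if_pos (show e2 + 1 ≤ e1 by omega),
    if_neg (show ¬ (b2 ≤ b2 - 1) by omega),
    if_neg (show ¬ (e2 + 1 ≤ e2) by omega)]
      simp [outs1, outs2]
      all_goals omega
    · rw [range_split_eq (b1, e1) (b2, e2) ⟨b2 - 1, b2 - 1, (false, false)⟩
          [⟨b2, b1 - 1, (false, true)⟩, ⟨b1, e1, (true, true)⟩, ⟨e1 + 1, e2, (false, true)⟩, ⟨e2 + 1, e2 + 1, (false, false)⟩]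
        (by intro x h1 h2; simp only [Seg_b, Seg_e] at h1 h2
            exact sig_FF (by omega) (by omega))
        (by intro h hm x h1 h2
            simp only [List.mem_cons, List.not_mem_nil, or_false] at hm
            rcases hm with rfl | rfl | rfl | rfl <;> simp only [Seg_b, Seg_e] at h1 h2
            · exact sig_FT (by omega) (by omega)
            · exact sig_TT (by omega) (by omega)
            · exact sig_FT (by omega) (by omega)
            · exact sig_FF (by omega) (by omega)
            )
        (by simp [segsOK] <;> omega)
        (by simp)
        (by simp [pts])
        (by simp [pts])
        (by intro x hx; simp [pts] at hx; simp; omega)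
        (by intro x hx; simp [pts] at hx; simp; omega)
        (by intro h hm
            simp only [List.mem_cons, List.not_mem_nil, or_false] at hm
            rcases hm with rfl | rfl | rfl | rfl <;> exact ⟨by simp [pts], by simp [pts]⟩)]
      simp only [range_split_alt, List.filter_cons, List.filter_nil, decide_eq_true_eq]
      rw [show max b1 b2 = b1 from max_eq_left (by omega),
    show min e1 e2 = e1 from min_eq_left (by omega),
    if_neg (show ¬ b1 > e1 by omega),
    if_neg (show ¬ (b1 ≤ b1 - 1) by omega),
    if_pos (show b1 ≤ e1 by omega),
    if_neg (show ¬ (e1 + 1 ≤ e1) by omega),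
    if_pos (show b2 ≤ b1 - 1 by omega),
    if_pos (show e1 + 1 ≤ e2 by omega)]
      simp [outs1, outs2]
      all_goals omega
    · rw [range_split_eq (b1, e1) (b2, e2) ⟨b2 - 1, b2 - 1, (false, false)⟩
          [⟨b2, b1 - 1, (false, true)⟩, ⟨b1, e1, (true, true)⟩, ⟨e1 + 1, e1 + 1, (false, false)⟩]
        (by intro x h1 h2; simp only [Seg_b, Seg_e] at h1 h2
            exact sig_FF (by omega) (by omega))
        (by intro h hm x h1 h2
            simp only [List.mem_cons, List.not_mem_nil, or_false] at hm
            rcases hm with rfl | rfl | rfl <;> simp only [Seg_b, Seg_e] at h1 h2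
            · exact sig_FT (by omega) (by omega)
            · exact sig_TT (by omega) (by omega)
            · exact sig_FF (by omega) (by omega)
            )
        (by simp [segsOK] <;> omega)
        (by simp)
        (by simp [pts])
        (by simp [pts])
        (by intro x hx; simp [pts] at hx; simp; omega)
        (by intro x hx; simp [pts] at hx; simp; omega)
        (by intro h hm
            simp only [List.mem_cons, List.not_mem_nil, or_false] at hm
            rcases hm with rfl | rfl | rfl <;> exact ⟨by simp [pts], by simp [pts]⟩)]
      simp only [range_split_alt, List.filter_cons, List.filter_nil, decide_eq_true_eq]
      rw [show max b1 b2 = b1 from max_eq_left (by omega),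
    show min e1 e2 = e1 from min_eq_left (by omega),
    if_neg (show ¬ b1 > e1 by omega),
    if_neg (show ¬ (b1 ≤ b1 - 1) by omega),
    if_pos (show b1 ≤ e1 by omega),
    if_neg (show ¬ (e1 + 1 ≤ e1) by omega),
    if_pos (show b2 ≤ b1 - 1 by omega),
    if_neg (show ¬ (e1 + 1 ≤ e2) by omega)]
      simp [outs1, outs2]
      all_goals omega
    · rw [range_split_eq (b1, e1) (b2, e2) ⟨b2 - 1, b2 - 1, (false, false)⟩
          [⟨b2, b1 - 1, (false, true)⟩, ⟨b1, e2, (true, true)⟩, ⟨e2 + 1, e1, (true, false)⟩, ⟨e1 + 1, e1 + 1, (false, false)⟩]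
        (by intro x h1 h2; simp only [Seg_b, Seg_e] at h1 h2
            exact sig_FF (by omega) (by omega))
        (by intro h hm x h1 h2
            simp only [List.mem_cons, List.not_mem_nil, or_false] at hm
            rcases hm with rfl | rfl | rfl | rfl <;> simp only [Seg_b, Seg_e] at h1 h2
            · exact sig_FT (by omega) (by omega)
            · exact sig_TT (by omega) (by omega)
            · exact sig_TF (by omega) (by omega)
            · exact sig_FF (by omega) (by omega)
            )
        (by simp [segsOK] <;> omega)
        (by simp)
        (by simp [pts])
        (by simp [pts])
        (by intro x hx; simp [pts] at hx; simp; omega)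
        (by intro x hx; simp [pts] at hx; simp; omega)
        (by intro h hm
            simp only [List.mem_cons, List.not_mem_nil, or_false] at hm
            rcases hm with rfl | rfl | rfl | rfl <;> exact ⟨by simp [pts], by simp [pts]⟩)]
      simp only [range_split_alt, List.filter_cons, List.filter_nil, decide_eq_true_eq]
      rw [show max b1 b2 = b1 from max_eq_left (by omega),
    show min e1 e2 = e2 from min_eq_right (by omega),
    if_neg (show ¬ b1 > e2 by omega),
    if_neg (show ¬ (b1 ≤ b1 - 1) by omega),
    if_pos (show b1 ≤ e2 by omega),
    if_pos (show e2 + 1 ≤ e1 by omega),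
    if_pos (show b2 ≤ b1 - 1 by omega),
    if_neg (show ¬ (e2 + 1 ≤ e2) by omega)]
      simp [outs1, outs2]
      all_goals omega
  case neg =>
    rcases (show e1 < b2 ∨ e2 < b1 by omega) with hd | hd
    · by_cases hg : b2 = e1 + 1
      · rw [range_split_eq (b1, e1) (b2, e2) ⟨b1 - 1, b1 - 1, (false, false)⟩
            [⟨b1, e1, (true, false)⟩, ⟨b2, e2, (false, true)⟩, ⟨e2 + 1, e2 + 1, (false, false)⟩]
          (by intro x h1 h2; simp only [Seg_b, Seg_e] at h1 h2
              exact sig_FF (by omega) (by omega))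
          (by intro h hm x h1 h2
              simp only [List.mem_cons, List.not_mem_nil, or_false] at hm
              rcases hm with rfl | rfl | rfl <;> simp only [Seg_b, Seg_e] at h1 h2
              · exact sig_TF (by omega) (by omega)
              · exact sig_FT (by omega) (by omega)
              · exact sig_FF (by omega) (by omega)
              )
          (by simp [segsOK] <;> omega)
          (by simp)
          (by simp [pts])
          (by simp [pts])
          (by intro x hx; simp [pts] at hx; simp; omega)
          (by intro x hx; simp [pts] at hx; simp; omega)
          (by intro h hm
              simp only [List.mem_cons, List.not_mem_nil, or_false] at hm
              rcases hm with rfl | rfl | rfl <;> exact ⟨by simp [pts], by simp [pts]⟩)]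
        simp only [range_split_alt, List.filter_cons, List.filter_nil, decide_eq_true_eq]
        rw [show max b1 b2 = b2 from max_eq_right (by omega),
    show min e1 e2 = e1 from min_eq_left (by omega),
    if_pos (show b2 > e1 by omega)]
        simp [outs1, outs2]
      · rw [range_split_eq (b1, e1) (b2, e2) ⟨b1 - 1, b1 - 1, (false, false)⟩
            [⟨b1, e1, (true, false)⟩, ⟨e1 + 1, b2 - 1, (false, false)⟩, ⟨b2, e2, (false, true)⟩, ⟨e2 + 1, e2 + 1, (false, false)⟩]
          (by intro x h1 h2; simp only [Seg_b, Seg_e] at h1 h2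
              exact sig_FF (by omega) (by omega))
          (by intro h hm x h1 h2
              simp only [List.mem_cons, List.not_mem_nil, or_false] at hm
              rcases hm with rfl | rfl | rfl | rfl <;> simp only [Seg_b, Seg_e] at h1 h2
              · exact sig_TF (by omega) (by omega)
              · exact sig_FF (by omega) (by omega)
              · exact sig_FT (by omega) (by omega)
              · exact sig_FF (by omega) (by omega)
              )
          (by simp [segsOK] <;> omega)
          (by simp)
          (by simp [pts])
          (by simp [pts])
          (by intro x hx; simp [pts] at hx; simp; omega)
          (by intro x hx; simp [pts] at hx; simp; omega)
          (by intro h hm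
              simp only [List.mem_cons, List.not_mem_nil, or_false] at hm
              rcases hm with rfl | rfl | rfl | rfl <;> exact ⟨by simp [pts], by simp [pts]⟩)]
        simp only [range_split_alt, List.filter_cons, List.filter_nil, decide_eq_true_eq]
        rw [show max b1 b2 = b2 from max_eq_right (by omega),
    show min e1 e2 = e1 from min_eq_left (by omega),
    if_pos (show b2 > e1 by omega)]
        simp [outs1, outs2]
    · by_cases hg : b1 = e2 + 1
      · rw [range_split_eq (b1, e1) (b2, e2) ⟨b2 - 1, b2 - 1, (false, false)⟩
            [⟨b2, e2, (false, true)⟩, ⟨b1, e1, (true, false)⟩, ⟨e1 + 1, e1 + 1, (false, false)⟩]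
          (by intro x h1 h2; simp only [Seg_b, Seg_e] at h1 h2
              exact sig_FF (by omega) (by omega))
          (by intro h hm x h1 h2
              simp only [List.mem_cons, List.not_mem_nil, or_false] at hm
              rcases hm with rfl | rfl | rfl <;> simp only [Seg_b, Seg_e] at h1 h2
              · exact sig_FT (by omega) (by omega)
              · exact sig_TF (by omega) (by omega)
              · exact sig_FF (by omega) (by omega)
              )
          (by simp [segsOK] <;> omega)
          (by simp)
          (by simp [pts])
          (by simp [pts])
          (by intro x hx; simp [pts] at hx; simp; omega)
          (by intro x hx; simp [pts] at hx; simp; omega)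
          (by intro h hm
              simp only [List.mem_cons, List.not_mem_nil, or_false] at hm
              rcases hm with rfl | rfl | rfl <;> exact ⟨by simp [pts], by simp [pts]⟩)]
        simp only [range_split_alt, List.filter_cons, List.filter_nil, decide_eq_true_eq]
        rw [show max b1 b2 = b1 from max_eq_left (by omega),
    show min e1 e2 = e2 from min_eq_right (by omega),
    if_pos (show b1 > e2 by omega)]
        simp [outs1, outs2]
      · rw [range_split_eq (b1, e1) (b2, e2) ⟨b2 - 1, b2 - 1, (false, false)⟩
            [⟨b2, e2, (false, true)⟩, ⟨e2 + 1, b1 - 1, (false, false)⟩, ⟨b1, e1, (true, false)⟩, ⟨e1 + 1, e1 + 1, (false, false)⟩]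
          (by intro x h1 h2; simp only [Seg_b, Seg_e] at h1 h2
              exact sig_FF (by omega) (by omega))
          (by intro h hm x h1 h2
              simp only [List.mem_cons, List.not_mem_nil, or_false] at hm
              rcases hm with rfl | rfl | rfl | rfl <;> simp only [Seg_b, Seg_e] at h1 h2
              · exact sig_FT (by omega) (by omega)
              · exact sig_FF (by omega) (by omega)
              · exact sig_TF (by omega) (by omega)
              · exact sig_FF (by omega) (by omega)
              )
          (by simp [segsOK] <;> omega)
          (by simp)
          (by simp [pts])
          (by simp [pts])
          (by intro x hx; simp [pts] at hx; simp; omega)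
          (by intro x hx; simp [pts] at hx; simp; omega)
          (by intro h hm
              simp only [List.mem_cons, List.not_mem_nil, or_false] at hm
              rcases hm with rfl | rfl | rfl | rfl <;> exact ⟨by simp [pts], by simp [pts]⟩)]
        simp only [range_split_alt, List.filter_cons, List.filter_nil, decide_eq_true_eq]
        rw [show max b1 b2 = b1 from max_eq_left (by omega),
    show min e1 e2 = e2 from min_eq_right (by omega),
    if_pos (show b1 > e2 by omega)]
        simp [outs1, outs2]
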